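-- pv_equiv track=rewrite | github.com/nvpraneeth/dc_assignments | Final_project_Implementation_1/mpls_handshake_momentum.py | verify_partial_gradients
-- ===== SOURCE A (Python) =====
-- from typing import List, Dict, Tuple, Optional
--
-- def verify_partial_gradients(gradients: Dict, expected_layers: List[str]) -> Tuple[bool, List[str]]:
--     """
--     Verify that a partial gradient dictionary contains all expected layers.
--
--     Returns:
--         (is_valid, missing_layers)
--     """
--     found_layers = set()
--     for key in gradients.keys():
--         for layer_name in expected_layers:
--             if layer_name in key:
--                 found_layers.add(layer_name)
--
--     missing_layers = [layer for layer in expected_layers if layer not in found_layers]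
--     is_valid = len(missing_layers) == 0
--
--     return is_valid, missing_layers
-- ===== SOURCE B (Python) =====
-- def verify_partial_gradients(gradients, expected_layers):
--     """
--     Verify that a partial gradient dictionary contains all expected layers.
--
--     Worklist algorithm: keep a shrinking list of still-unmatched layers and
--     strike out, key by key, the layers each key satisfies; stop as soon as
--     nothing is left to find.
--
--     Returns:
--         (is_valid, missing_layers)
--     """
--     remaining = list(expected_layers)
--     for key in gradients:
--         if not remaining:
--             break
--         remaining = [layer for layer in remaining if layer not in key]
--     return (not remaining, remaining)
-- ===== Notes on version B (the rewrite author's own statement) =====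
-- stated objective: faster
-- what changed: Replaces A's accumulate-a-found-set-then-filter with a worklist: a shrinking list of still-unmatched layers is pruned key by key and the key loop exits early once it is empty; the surviving worklist IS the missing list.
import Mathlib
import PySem

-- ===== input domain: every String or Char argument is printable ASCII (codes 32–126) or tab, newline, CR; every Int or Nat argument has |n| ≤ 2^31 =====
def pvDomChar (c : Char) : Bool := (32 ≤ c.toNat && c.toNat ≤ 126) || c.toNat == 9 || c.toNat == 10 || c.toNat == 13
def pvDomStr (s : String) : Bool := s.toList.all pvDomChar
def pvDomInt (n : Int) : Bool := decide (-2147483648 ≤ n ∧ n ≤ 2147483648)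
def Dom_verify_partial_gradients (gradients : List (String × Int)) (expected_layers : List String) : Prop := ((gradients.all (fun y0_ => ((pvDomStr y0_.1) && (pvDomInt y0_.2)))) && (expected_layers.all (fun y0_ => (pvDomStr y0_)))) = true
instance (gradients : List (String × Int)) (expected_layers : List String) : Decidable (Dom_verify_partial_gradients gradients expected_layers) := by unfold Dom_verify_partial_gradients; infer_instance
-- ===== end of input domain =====

-- B replaces A's accumulate-a-found-set-then-filter with a worklist: a shrinking list of
-- still-unmatched layers pruned key by key, with an early exit once it is empty (objective: alternative).

-- ===== PORT A =====
def verify_partial_gradients (gradients : List (String × Int)) (expected_layers : List String) : Bool × List String :=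
  let found_layers : PySem.Set String :=
    gradients.foldl (fun found kv =>
      expected_layers.foldl (fun found layer_name =>
        if PySem.Str.isIn layer_name kv.1 then found.add layer_name else found) found)
      PySem.Set.empty
  let missing_layers := expected_layers.filter (fun layer => !(found_layers.contains layer))
  let is_valid := missing_layers.length == 0
  (is_valid, missing_layers)

-- ===== PORT B =====
-- the key loop with early break: recursion over the keys, carrying the shrinking worklist
def vpgWorklist (keys : List (String × Int)) (remaining : List String) : List String :=
  match keys with
  | [] => remaining
  | kv :: rest =>
    if remaining.isEmpty then remaining
    else vpgWorklist rest (remaining.filter (fun layer => !(PySem.Str.isIn layer kv.1)))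

def verify_partial_gradients_alt (gradients : List (String × Int)) (expected_layers : List String) : Bool × List String :=
  let remaining := vpgWorklist gradients expected_layers
  (remaining.isEmpty, remaining)

-- ===== PRECONDITION & SPEC =====
def Spec_verify_partial_gradients (gradients : List (String × Int)) (expected_layers : List String) (out : Bool × List String) : Prop := out = verify_partial_gradients_alt gradients expected_layers
instance (gradients : List (String × Int)) (expected_layers : List String) (out : Bool × List String) : Decidable (Spec_verify_partial_gradients gradients expected_layers out) := by unfold Spec_verify_partial_gradients; infer_instance

-- ===== CLAIM (what is proved, stated in full; the proofs are below) =====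
def Claim_equal_verify_partial_gradients : Prop := ∀ (gradients : List (String × Int)) (expected_layers : List String), Dom_verify_partial_gradients gradients expected_layers → Spec_verify_partial_gradients gradients expected_layers (verify_partial_gradients gradients expected_layers)

-- ===== LEMMAS AND PROOFS =====

-- membership after the inner loop over expected_layers for one key
theorem pv_inner_mem (layers : List String) (key : String) (s : PySem.Set String) (l : String) :
    l ∈ layers.foldl (fun found ln => if PySem.Str.isIn ln key then PySem.Set.add found ln else found) s ↔
      l ∈ s ∨ (l ∈ layers ∧ PySem.Str.isIn l key = true) := by
  induction layers generalizing s with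
  | nil => simp
  | cons x xs ih =>
    simp only [List.foldl_cons, ih]
    by_cases hx : PySem.Str.isIn x key = true
    · rw [if_pos hx]
      simp only [PySem.Set.mem_add, List.mem_cons]
      constructor
      · rintro ((h | rfl) | ⟨h, h2⟩)
        · exact Or.inl h
        · exact Or.inr ⟨Or.inl rfl, hx⟩
        · exact Or.inr ⟨Or.inr h, h2⟩
      · rintro (h | ⟨(rfl | h), h2⟩)
        · exact Or.inl (Or.inl h)
        · exact Or.inl (Or.inr rfl)
        · exact Or.inr ⟨h, h2⟩
    · rw [if_neg hx]
      constructor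
      · rintro (h | ⟨h, h2⟩)
        · exact Or.inl h
        · exact Or.inr ⟨List.mem_cons_of_mem _ h, h2⟩
      · rintro (h | ⟨h, h2⟩)
        · exact Or.inl h
        · rcases List.mem_cons.mp h with rfl | h
          · exact absurd h2 hx
          · exact Or.inr ⟨h, h2⟩

-- membership in the accumulated found_layers set after the outer loop
theorem pv_found_mem (grads : List (String × Int)) (layers : List String) (s : PySem.Set String) (l : String) :
    l ∈ grads.foldl (fun found kv =>
        layers.foldl (fun found ln => if PySem.Str.isIn ln kv.1 then PySem.Set.add found ln else found) found) s ↔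
      l ∈ s ∨ (l ∈ layers ∧ grads.any (fun kv => PySem.Str.isIn l kv.1) = true) := by
  induction grads generalizing s with
  | nil => simp
  | cons kv rest ih =>
    simp only [List.foldl_cons, ih, pv_inner_mem, List.any_cons]
    constructor
    · rintro ((h | ⟨h1, h2⟩) | ⟨h1, h2⟩)
      · exact Or.inl h
      · exact Or.inr ⟨h1, Bool.or_eq_true_iff.mpr (Or.inl h2)⟩
      · exact Or.inr ⟨h1, Bool.or_eq_true_iff.mpr (Or.inr h2)⟩
    · rintro (h | ⟨h1, h2⟩)
      · exact Or.inl (Or.inl h)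
      · rcases Bool.or_eq_true_iff.mp h2 with h | h
        · exact Or.inl (Or.inr ⟨h1, h⟩)
        · exact Or.inr ⟨h1, h⟩

-- the worklist recursion computes the direct filter by "no key matches"
theorem pv_worklist_eq (keys : List (String × Int)) (r : List String) :
    vpgWorklist keys r = r.filter (fun l => !(keys.any (fun kv => PySem.Str.isIn l kv.1))) := by
  induction keys generalizing r with
  | nil => simp [vpgWorklist]
  | cons kv rest ih =>
    unfold vpgWorklist
    by_cases hr : r.isEmpty
    · rw [if_pos hr]
      rw [List.isEmpty_iff.mp hr]
      simp
    · rw [if_neg hr, ih, List.filter_filter]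
      apply List.filter_congr
      intro l _
      simp [List.any_cons, Bool.and_comm]

-- ===== VERDICT (by name: the statement is the Claim_ definition above) =====
theorem verify_partial_gradients_spec : Claim_equal_verify_partial_gradients := by
  intro gradients expected_layers _
  unfold Spec_verify_partial_gradients verify_partial_gradients verify_partial_gradients_alt
  rw [pv_worklist_eq]
  have hfilter :
      expected_layers.filter (fun layer => !(PySem.Set.contains
        (gradients.foldl (fun found kv =>
          expected_layers.foldl (fun found ln => if PySem.Str.isIn ln kv.1 then PySem.Set.add found ln else found) found)
          PySem.Set.empty) layer)) =
      expected_layers.filter (fun layer => !(gradients.any (fun kv => PySem.Str.isIn layer kv.1))) := by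
    apply List.filter_congr
    intro l hl
    have hkey : PySem.Set.contains
        (gradients.foldl (fun found kv =>
          expected_layers.foldl (fun found ln => if PySem.Str.isIn ln kv.1 then PySem.Set.add found ln else found) found)
          PySem.Set.empty) l = gradients.any (fun kv => PySem.Str.isIn l kv.1) := by
      have hm := pv_found_mem gradients expected_layers PySem.Set.empty l
      by_cases h : gradients.any (fun kv => PySem.Str.isIn l kv.1) = true
      · rw [h, PySem.Set.contains_iff]
        exact hm.mpr (Or.inr ⟨hl, h⟩)
      · rw [Bool.eq_false_iff.mpr h, ← Bool.not_eq_true, PySem.Set.contains_iff]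
        intro hmem
        rcases hm.mp hmem with h0 | ⟨_, h2⟩
        · simp [PySem.Set.empty] at h0
        · exact h h2
    rw [hkey]
  simp only [PySem.Set.add_eq_ite] at hfilter ⊢
  rw [hfilter]
  cases expected_layers.filter (fun layer => !(gradients.any (fun kv => PySem.Str.isIn layer kv.1))) <;> simp
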